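-- pv_equiv track=rewrite | github.com/zhouchanghai/problem_ans | codility/2019Yttrium.py | solution
-- ===== SOURCE A (Python) =====
-- def solution(S, K):
--     count = [0]*26
--     distinct = 0
--     for i in range(len(S)-1, -1, -1):
--         c = ord(S[i]) - ord('a')
--         if distinct==K and not count[c]:
--             break
--         count[c] += 1
--         if count[c] == 1:
--             distinct += 1
--     else:
--         return 0 if distinct==K else -1
--     #S[left : right+1] is the removed part
--     left, right = 0, i
--     ret = right + 1
--     while 1:
--         if distinct == K:
--             #release the left
--             left += 1
--             c = ord(S[left-1]) - ord('a')
--             count[c] += 1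
--             if count[c] == 1:
--                 distinct += 1
--             else:
--                 ret = min(ret, right-left+1)
--         else:
--             #eat the right
--             right += 1
--             if right >= len(S): break
--             c = ord(S[right]) - ord('a')
--             count[c] -= 1
--             if count[c] == 0:
--                 distinct -= 1
--                 ret = min(ret, right - left + 1)
--     return ret
-- ===== SOURCE B (Python) =====
-- def solution(S, K):
--     n = len(S)
--     suf = [frozenset()] * (n + 1)
--     for j in range(n - 1, -1, -1):
--         suf[j] = suf[j + 1] | {S[j]}
--     total = len(suf[0])
--     if K < 0 or K > total:
--         return -1
--     if K == total:
--         return 0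
--     best = n
--     pre = set()
--     for i in range(n):
--         if len(pre) <= K:
--             lo, hi = i, n - 1
--             while lo < hi:
--                 mid = (lo + hi) // 2
--                 if len(pre | suf[mid + 1]) <= K:
--                     hi = mid
--                 else:
--                     lo = mid + 1
--             best = min(best, lo - i + 1)
--         pre.add(S[i])
--     return best
-- ===== Notes on version B (the rewrite author's own statement) =====
-- stated objective: alternative
-- what changed: Replaces A's backward scan + two-pointer sweep over a mutable 26-entry count array by precomputed suffix distinct-character sets plus, for each removal start index, a binary search for the least removal end that leaves at most K distinct characters (which then leaves exactly K). Pre_ restricts inputs to strings of lowercase 'a'-'z' (the task's natural domain): on other characters A raises IndexError or returns values distorted by Python's negative-index wraparound, which aliases e.g. 'G' with 'a' in the 26-entry count array.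
-- outside the precondition, e.g. on solution('Ga', 1): A returns 0, B returns 1
import Mathlib
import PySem

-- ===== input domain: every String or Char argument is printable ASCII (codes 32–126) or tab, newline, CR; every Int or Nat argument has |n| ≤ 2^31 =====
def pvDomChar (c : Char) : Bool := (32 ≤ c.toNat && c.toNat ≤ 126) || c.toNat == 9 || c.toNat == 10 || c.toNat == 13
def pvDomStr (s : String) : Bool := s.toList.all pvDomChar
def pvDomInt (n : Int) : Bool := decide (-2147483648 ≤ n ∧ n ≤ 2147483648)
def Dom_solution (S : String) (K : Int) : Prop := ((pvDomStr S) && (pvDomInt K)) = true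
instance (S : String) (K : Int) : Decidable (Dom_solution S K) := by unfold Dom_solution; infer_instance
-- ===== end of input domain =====

-- B replaces A's backward scan + two-pointer sweep by suffix distinct-sets and a per-start binary
-- search (alternative algorithm, not claimed faster); equivalence is proved on lowercase strings.

-- ===== PORT A =====
-- the backward for-loop with break/else: '.inl (i, count, distinct)' = break at index i, '.inr distinct' = loop ran out (else-branch)
def solLoop1 (cs : List Char) (K : Int) : List Int → List Int → Int → Sum (Int × List Int × Int) Int
  | [], _, distinct => .inr distinct
  | i :: rest, count, distinct =>
    -- c = ord(S[i]) - ord('a'); '.toNat' of the looked-up char is exact: the index i is in range on Pre_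
    let c : Int := ((PySem.List.pyGetD cs i ' ').toNat : Int) - 97
    if distinct = K ∧ PySem.List.pyGetD count c 0 = 0 then .inl (i, count, distinct)
    else
      let count1 := PySem.List.pySetD count c (PySem.List.pyGetD count c 0 + 1)
      if PySem.List.pyGetD count1 c 0 = 1 then solLoop1 cs K rest count1 (distinct + 1)
      else solLoop1 cs K rest count1 distinct

-- the 'while 1' loop; the fuel only makes the recursion structural (each pass advances left or
-- right, so 2*len(S)+2 passes are never exhausted before the Python loop's own exit)
def solLoop2 (cs : List Char) (K : Int) : Nat → List Int → Int → Int → Int → Int → Int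
  | 0, _, _, _, _, ret => ret
  | fuel + 1, count, distinct, left, right, ret =>
    if distinct = K then
      let left1 := left + 1
      let c : Int := ((PySem.List.pyGetD cs (left1 - 1) ' ').toNat : Int) - 97
      let count1 := PySem.List.pySetD count c (PySem.List.pyGetD count c 0 + 1)
      if PySem.List.pyGetD count1 c 0 = 1 then
        solLoop2 cs K fuel count1 (distinct + 1) left1 right ret
      else
        solLoop2 cs K fuel count1 distinct left1 right (min ret (right - left1 + 1))
    else
      let right1 := right + 1
      if right1 ≥ (cs.length : Int) then ret
      else
        let c : Int := ((PySem.List.pyGetD cs right1 ' ').toNat : Int) - 97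
        let count1 := PySem.List.pySetD count c (PySem.List.pyGetD count c 0 - 1)
        if PySem.List.pyGetD count1 c 0 = 0 then
          solLoop2 cs K fuel count1 (distinct - 1) left right1 (min ret (right1 - left + 1))
        else
          solLoop2 cs K fuel count1 distinct left right1 ret

def solution (S : String) (K : Int) : Int :=
  let cs := S.toList
  let n : Int := (cs.length : Int)
  match solLoop1 cs K (PySem.List.pyRange (n - 1) (-1) (-1)) (List.replicate 26 0) 0 with
  | .inr distinct => if distinct = K then 0 else -1
  | .inl (i, count, distinct) => solLoop2 cs K (2 * cs.length + 2) count distinct 0 i (i + 1)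

-- ===== PORT B =====
-- binary search: while lo < hi: mid = (lo+hi)//2; if len(pre | suf[mid+1]) <= K: hi = mid else lo = mid+1
def altBS (suf : List (PySem.Set Char)) (pre : PySem.Set Char) (K : Int) (lo hi : Int) : Int :=
  if h : lo < hi then
    let mid := PySem.Int.floordiv (lo + hi) 2
    if (PySem.Set.len (PySem.Set.union pre (PySem.List.pyGetD suf (mid + 1) PySem.Set.empty)) : Int) ≤ K then
      altBS suf pre K lo mid
    else
      altBS suf pre K (mid + 1) hi
  else lo
  termination_by (hi - lo).toNat
  decreasing_by
  · have h1 := (PySem.Int.floordiv_lt_iff_lt_mul (a := lo + hi) (b := 2) (q := hi) (by omega)).mpr (by omega)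
    omega
  · have h2 := (PySem.Int.le_floordiv_iff_mul_le (a := lo + hi) (b := 2) (q := lo) (by omega)).mpr (by omega)
    omega

def solution_alt (S : String) (K : Int) : Int :=
  let cs := S.toList
  let n : Int := (cs.length : Int)
  let suf := (PySem.List.pyRange (n - 1) (-1) (-1)).foldl
      (fun suf j => PySem.List.pySetD suf j
        (PySem.Set.union (PySem.List.pyGetD suf (j + 1) PySem.Set.empty)
          (PySem.Set.ofList [PySem.List.pyGetD cs j ' '])))
      (List.replicate (cs.length + 1) PySem.Set.empty)
  let total : Int := (PySem.Set.len (PySem.List.pyGetD suf 0 PySem.Set.empty) : Int)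
  if K < 0 ∨ total < K then -1
  else if K = total then 0
  else
    ((PySem.List.pyRange 0 n 1).foldl
      (fun (st : Int × PySem.Set Char) i =>
        let best1 := if (PySem.Set.len st.2 : Int) ≤ K then
            min st.1 (altBS suf st.2 K i (n - 1) - i + 1)
          else st.1
        (best1, PySem.Set.add st.2 (PySem.List.pyGetD cs i ' ')))
      (n, PySem.Set.empty)).1

-- ===== PRECONDITION & SPEC =====
-- Pre_ restricts inputs to strings of lowercase 'a'-'z' (the task's natural domain): on other
-- characters A raises IndexError or returns values distorted by Python's negative-index
-- wraparound, which aliases e.g. 'G' with 'a' in the 26-entry count array.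
def Pre_solution (S : String) (K : Int) : Prop :=
  (S.toList.all (fun c => 97 ≤ c.toNat && c.toNat ≤ 122)) = true
instance (S : String) (K : Int) : Decidable (Pre_solution S K) := by unfold Pre_solution; infer_instance
def pvWitness_solution : String × Int := ("abca", 2)

def Spec_solution (S : String) (K : Int) (out : Int) : Prop := out = solution_alt S K
instance (S : String) (K : Int) (out : Int) : Decidable (Spec_solution S K out) := by unfold Spec_solution; infer_instance

-- ===== CLAIM (what is proved, stated in full; the proofs are below) =====
def Claim_equal_solution : Prop := ∀ (S : String) (K : Int), Dom_solution S K → Pre_solution S K → Spec_solution S K (solution S K)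

-- ===== LEMMAS AND PROOFS =====

-- distinct-character count of a list
def pvDc (l : List Char) : Nat := l.toFinset.card

-- the string left over after removing the (closed) index window [l, r]
def pvRem (cs : List Char) (l r : Int) : List Char := cs.take l.toNat ++ cs.drop (r + 1).toNat

-- a valid removal window leaving exactly K distinct characters
def pvGood (cs : List Char) (K : Int) (i j : Int) : Prop :=
  0 ≤ i ∧ i ≤ j ∧ j < (cs.length : Int) ∧ (pvDc (pvRem cs i j) : Int) = K

-- m is the minimal length of a good window
def pvIsMin (cs : List Char) (K m : Int) : Prop :=
  (∃ i j, pvGood cs K i j ∧ m = j - i + 1) ∧ ∀ i j, pvGood cs K i j → m ≤ j - i + 1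

lemma pvIsMin_unique {cs : List Char} {K m m' : Int}
    (h : pvIsMin cs K m) (h' : pvIsMin cs K m') : m = m' := by
  obtain ⟨⟨i, j, hg, rfl⟩, hmin⟩ := h
  obtain ⟨⟨i', j', hg', rfl⟩, hmin'⟩ := h'
  exact le_antisymm (hmin _ _ hg') (hmin' _ _ hg)

-- ---- generic facts about distinct counts ----

lemma pvTake_fs_mono (cs : List Char) {i i' : Nat} (h : i ≤ i') :
    (cs.take i).toFinset ⊆ (cs.take i').toFinset := by
  intro x hx; simp only [List.mem_toFinset] at *
  exact (List.take_prefix_take_left h).subset hx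

lemma pvDrop_fs_mono (cs : List Char) {j j' : Nat} (h : j ≤ j') :
    (cs.drop j').toFinset ⊆ (cs.drop j).toFinset := by
  intro x hx; simp only [List.mem_toFinset] at *
  exact (List.drop_suffix_drop_left cs h).subset hx

lemma pvMidInsert (l l' : List Char) (c : Char) :
    (l ++ c :: l').toFinset = insert c ((l ++ l').toFinset) := by
  simp only [List.toFinset_append, List.toFinset_cons]
  exact Finset.union_insert ..

lemma pvMidCount (l l' : List Char) (c x : Char) :
    (l ++ c :: l').count x = (l ++ l').count x + (if x = c then 1 else 0) := by
  by_cases hxc : x = c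
  · simp [hxc, List.count_append]; omega
  · have : ¬ c = x := fun h => hxc h.symm
    simp [hxc, this, List.count_append]

lemma pvMem_iff_count (l : List Char) (x : Char) : x ∈ l ↔ l.count x ≠ 0 := by
  rw [Ne, List.count_eq_zero]; tauto

lemma pvDc_insert_mem {l : List Char} {c : Char} (h : c ∈ l) : (insert c l.toFinset).card = pvDc l := by
  rw [Finset.insert_eq_self.mpr (List.mem_toFinset.mpr h)]; rfl

lemma pvDc_insert_not_mem {l : List Char} {c : Char} (h : c ∉ l) :
    (insert c l.toFinset).card = pvDc l + 1 := by
  rw [Finset.card_insert_of_notMem (fun hc => h (List.mem_toFinset.mp hc))]; rfl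

lemma pvDc_mid_mem {l l' : List Char} {c : Char} (h : c ∈ l ++ l') :
    pvDc (l ++ c :: l') = pvDc (l ++ l') := by
  show (l ++ c :: l').toFinset.card = _
  rw [pvMidInsert]; exact pvDc_insert_mem h

lemma pvDc_mid_not_mem {l l' : List Char} {c : Char} (h : c ∉ l ++ l') :
    pvDc (l ++ c :: l') = pvDc (l ++ l') + 1 := by
  show (l ++ c :: l').toFinset.card = _
  rw [pvMidInsert]; exact pvDc_insert_not_mem h

lemma pvDc_mid_le (l l' : List Char) (c : Char) : pvDc (l ++ c :: l') ≤ pvDc (l ++ l') + 1 := by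
  by_cases h : c ∈ l ++ l'
  · rw [pvDc_mid_mem h]; omega
  · rw [pvDc_mid_not_mem h]

lemma pvDc_le_mid (l l' : List Char) (c : Char) : pvDc (l ++ l') ≤ pvDc (l ++ c :: l') := by
  apply Finset.card_le_card
  rw [pvMidInsert]; exact Finset.subset_insert _ _

lemma pvDc_cons_le (l : List Char) (c : Char) : pvDc (c :: l) ≤ pvDc l + 1 :=
  pvDc_mid_le [] l c

lemma pvDc_le_cons (l : List Char) (c : Char) : pvDc l ≤ pvDc (c :: l) :=
  pvDc_le_mid [] l c

lemma pvExistsDrop (l : List Char) (K : Nat) (hK : K < pvDc l) :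
    ∃ j < l.length, pvDc (l.drop (j + 1)) = K ∧ pvDc (l.drop j) = K + 1 := by
  induction l with
  | nil => simp [pvDc] at hK
  | cons c t ih =>
    by_cases h : K < pvDc t
    · obtain ⟨j, hj, h1, h2⟩ := ih h
      exact ⟨j + 1, by simpa using Nat.succ_lt_succ hj, h1, h2⟩
    · push Not at h
      have h2 := pvDc_cons_le t c
      have h3 := pvDc_le_cons t c
      refine ⟨0, by simp, ?_, ?_⟩
      · simp only [List.drop_succ_cons, List.drop_zero]; omega
      · simp only [List.drop_zero]; omega

lemma pvExistsTake (l : List Char) (K : Nat) (hK : K < pvDc l) :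
    ∃ i ≤ l.length, pvDc (l.take i) = K := by
  have hrev : pvDc l.reverse = pvDc l := by simp [pvDc]
  obtain ⟨j, hj, h1, _⟩ := pvExistsDrop l.reverse K (by rwa [hrev])
  refine ⟨l.length - (j + 1), by omega, ?_⟩
  have h2 : l.reverse.drop (j + 1) = (l.take (l.length - (j + 1))).reverse :=
    List.drop_reverse
  rw [h2] at h1; simpa [pvDc] using h1

lemma pvCharBounds {c : Char} (h1 : 'a' ≤ c) (h2 : c ≤ 'z') : 97 ≤ c.toNat ∧ c.toNat ≤ 122 := by
  rw [Char.le_def] at h1 h2; exact ⟨h1, h2⟩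

lemma pvCharInj {c c' : Char} (h : c.toNat = c'.toNat) : c = c' := by
  apply Char.ext; exact UInt32.toNat_inj.mp h

lemma pvSplit (cs : List Char) {i : Nat} (h : i < cs.length) :
    cs.take i ++ cs[i] :: cs.drop (i + 1) = cs := by
  conv_rhs => rw [← List.take_append_drop i cs]
  rw [List.drop_eq_getElem_cons h]

lemma pvDc_diag (cs : List Char) {i : Nat} (h : i < cs.length) :
    pvDc cs ≤ pvDc (cs.take i ++ cs.drop (i + 1)) + 1 := by
  calc pvDc cs = pvDc (cs.take i ++ cs[i] :: cs.drop (i + 1)) := by rw [pvSplit cs h]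
  _ ≤ _ := pvDc_mid_le ..

lemma pvDc_rem_mono_i (cs : List Char) {i i' : Nat} (k : Nat) (h : i ≤ i') :
    pvDc (cs.take i ++ cs.drop k) ≤ pvDc (cs.take i' ++ cs.drop k) := by
  apply Finset.card_le_card
  simp only [List.toFinset_append]
  exact Finset.union_subset_union_left (pvTake_fs_mono cs h)

lemma pvDc_rem_mono_j (cs : List Char) (i : Nat) {k k' : Nat} (h : k ≤ k') :
    pvDc (cs.take i ++ cs.drop k') ≤ pvDc (cs.take i ++ cs.drop k) := by
  apply Finset.card_le_card
  simp only [List.toFinset_append]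
  exact Finset.union_subset_union_right (pvDrop_fs_mono cs h)

lemma pvDc_drop_le_rem (cs : List Char) (i k : Nat) :
    pvDc (cs.drop k) ≤ pvDc (cs.take i ++ cs.drop k) := by
  apply Finset.card_le_card
  simp only [List.toFinset_append]
  exact Finset.subset_union_right

lemma pvDc_drop_anti (cs : List Char) {k k' : Nat} (h : k ≤ k') :
    pvDc (cs.drop k') ≤ pvDc (cs.drop k) :=
  Finset.card_le_card (pvDrop_fs_mono cs h)

lemma pvDc_take_le_rem (cs : List Char) (i k : Nat) :
    pvDc (cs.take i) ≤ pvDc (cs.take i ++ cs.drop k) := by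
  apply Finset.card_le_card
  simp only [List.toFinset_append]
  exact Finset.subset_union_left

lemma pvRem_nat (cs : List Char) (l r : Nat) :
    pvRem cs (l : Int) (r : Int) = cs.take l ++ cs.drop (r + 1) := by
  have h1 : ((l : Int)).toNat = l := by omega
  have h2 : ((r : Int) + 1).toNat = r + 1 := by omega
  rw [pvRem, h1, h2]

-- ---- the 26-entry count array of port A, related to character multiplicities ----

def pvCountInv (count : List Int) (l : List Char) : Prop :=
  count.length = 26 ∧ ∀ ch : Char, 'a' ≤ ch → ch ≤ 'z' →
    PySem.List.pyGetD count ((ch.toNat : Int) - 97) 0 = (l.count ch : Int)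

lemma pvCountInv_replicate : pvCountInv (List.replicate 26 0) [] := by
  refine ⟨by simp, fun ch h1 h2 => ?_⟩
  obtain ⟨hb1, hb2⟩ := pvCharBounds h1 h2
  have hc : ((ch.toNat : Int) - 97) = ((ch.toNat - 97 : Nat) : Int) := by omega
  rw [hc, PySem.List.pyGetD_natCast]
  rw [List.getD_eq_getElem _ _ (by simpa using (by omega : ch.toNat - 97 < 26))]
  exact (List.mem_replicate.mp (List.getElem_mem _)).2

lemma pvCountInv_upd {count : List Int} {A B : List Char} {ch : Char} (δ : Int)
    (hc : pvCountInv count A) (h1 : 'a' ≤ ch) (h2 : ch ≤ 'z')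
    (hAB : ∀ x : Char, 'a' ≤ x → x ≤ 'z' →
      (B.count x : Int) = (A.count x : Int) + (if x = ch then δ else 0)) :
    pvCountInv (PySem.List.pySetD count ((ch.toNat : Int) - 97)
      (PySem.List.pyGetD count ((ch.toNat : Int) - 97) 0 + δ)) B := by
  obtain ⟨hlen, hget⟩ := hc
  obtain ⟨hb1, hb2⟩ := pvCharBounds h1 h2
  have hcn : ((ch.toNat : Int) - 97) = ((ch.toNat - 97 : Nat) : Int) := by omega
  refine ⟨by rw [PySem.List.length_pySetD]; exact hlen, fun x hx1 hx2 => ?_⟩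
  obtain ⟨hxb1, hxb2⟩ := pvCharBounds hx1 hx2
  have hxn : ((x.toNat : Int) - 97) = ((x.toNat - 97 : Nat) : Int) := by omega
  rw [hcn, hxn, PySem.List.pyGetD_pySetD_natCast _ _ _ _ _ (by omega : ch.toNat - 97 < count.length)]
  by_cases heq : x = ch
  · subst heq
    rw [if_pos rfl, ← hxn, hget x hx1 hx2, hAB x hx1 hx2, if_pos rfl]
  · have hne : x.toNat - 97 ≠ ch.toNat - 97 := by
      intro hcontra
      exact heq (pvCharInj (by omega))
    rw [if_neg hne, ← hxn, hget x hx1 hx2, hAB x hx1 hx2, if_neg heq]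
    omega

-- ---- port A: the backward scan (loop 1) ----

lemma pvLoop1_nobreak (cs : List Char) (K : Int) (hlc : ∀ c ∈ cs, 'a' ≤ c ∧ c ≤ 'z') :
    ∀ (m : Nat), m ≤ cs.length → ∀ (count : List Int) (distinct : Int),
    pvCountInv count (cs.drop m) → distinct = (pvDc (cs.drop m) : Int) →
    (∀ j : Nat, j < m → ¬ ((pvDc (cs.drop (j + 1)) : Int) = K ∧ (pvDc (cs.drop j) : Int) = K + 1)) →
    solLoop1 cs K (PySem.List.pyRange ((m : Int) - 1) (-1) (-1)) count distinct
      = .inr ((pvDc cs : Int)) := by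
  intro m
  induction m with
  | zero =>
    intro _ count distinct _ hd _
    rw [show ((0 : Nat) : Int) - 1 = -1 by norm_num,
        PySem.List.pyRange_neg_one_eq_nil (by omega), solLoop1, hd]
    simp
  | succ m ih =>
    intro hm count distinct hcnt hd hnb
    have hmn : m < cs.length := by omega
    have hch : PySem.List.pyGetD cs ((m : Nat) : Int) ' ' = cs[m] :=
      PySem.List.pyGetD_eq_getElem _ _ (by omega) (by exact_mod_cast hmn)
    obtain ⟨hlow1, hlow2⟩ := hlc cs[m] (List.getElem_mem hmn)
    have hdropm : cs.drop m = cs[m] :: cs.drop (m + 1) := List.drop_eq_getElem_cons hmn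
    have hcounts : ∀ x : Char, 'a' ≤ x → x ≤ 'z' →
        ((cs.drop m).count x : Int) = ((cs.drop (m + 1)).count x : Int) +
          (if x = cs[m] then 1 else 0) := by
      intro x _ _
      rw [hdropm, List.count_cons]
      by_cases hx : x = cs[m]
      · simp [hx]
      · have hyx : ¬ cs[m] = x := fun h => hx h.symm
        simp [hx, hyx]
    have hgetc : PySem.List.pyGetD count ((cs[m].toNat : Int) - 97) 0
        = ((cs.drop (m + 1)).count cs[m] : Int) := hcnt.2 _ hlow1 hlow2
    rw [show ((m + 1 : Nat) : Int) - 1 = (m : Int) by omega,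
        PySem.List.pyRange_neg_one_cons (by omega : (-1 : Int) < (m : Int))]
    simp only [solLoop1, hch]
    have hnobrk : ¬ (distinct = K ∧ PySem.List.pyGetD count ((cs[m].toNat : Int) - 97) 0 = 0) := by
      rintro ⟨hdk, hz⟩
      rw [hgetc] at hz
      have hnot : cs[m] ∉ cs.drop (m + 1) := by
        rw [pvMem_iff_count]; omega
      have := pvDc_mid_not_mem (l := []) (l' := cs.drop (m + 1)) hnot
      simp only [List.nil_append] at this
      rw [← hdropm] at this
      exact hnb m (by omega) ⟨by omega, by omega⟩
    rw [if_neg hnobrk]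
    have hcnt1 := pvCountInv_upd 1 hcnt hlow1 hlow2 hcounts
    have hget1 : PySem.List.pyGetD (PySem.List.pySetD count ((cs[m].toNat : Int) - 97)
        (PySem.List.pyGetD count ((cs[m].toNat : Int) - 97) 0 + 1)) ((cs[m].toNat : Int) - 97) 0
        = ((cs.drop m).count cs[m] : Int) := hcnt1.2 _ hlow1 hlow2
    have hcountm : ((cs.drop m).count cs[m] : Int)
        = ((cs.drop (m + 1)).count cs[m] : Int) + 1 := by
      rw [hcounts cs[m] hlow1 hlow2, if_pos rfl]
    by_cases hnew : cs[m] ∈ cs.drop (m + 1)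
    · have hone : ¬ (PySem.List.pyGetD (PySem.List.pySetD count ((cs[m].toNat : Int) - 97)
          (PySem.List.pyGetD count ((cs[m].toNat : Int) - 97) 0 + 1)) ((cs[m].toNat : Int) - 97) 0 = 1) := by
        rw [hget1, hcountm]
        have := (pvMem_iff_count _ _).mp hnew
        omega
      rw [if_neg hone]
      apply ih (by omega) _ _ hcnt1
      · have := pvDc_mid_mem (l := []) (l' := cs.drop (m + 1)) (by simpa using hnew)
        simp only [List.nil_append] at this
        rw [← hdropm] at this
        rw [hd, this]
      · intro j hj
        exact hnb j (by omega)
    · have hone : PySem.List.pyGetD (PySem.List.pySetD count ((cs[m].toNat : Int) - 97)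
          (PySem.List.pyGetD count ((cs[m].toNat : Int) - 97) 0 + 1)) ((cs[m].toNat : Int) - 97) 0 = 1 := by
        rw [hget1, hcountm]
        have hz : (cs.drop (m + 1)).count cs[m] = 0 := by
          by_contra hnz
          exact hnew ((pvMem_iff_count _ _).mpr hnz)
        omega
      rw [if_pos hone]
      apply ih (by omega) _ _ hcnt1
      · have := pvDc_mid_not_mem (l := []) (l' := cs.drop (m + 1)) (by simpa using hnew)
        simp only [List.nil_append] at this
        rw [← hdropm] at this
        rw [hd, this]
        push_cast
        ring
      · intro j hj
        exact hnb j (by omega)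

lemma pvLoop1_break (cs : List Char) (K : Int) (hlc : ∀ c ∈ cs, 'a' ≤ c ∧ c ≤ 'z') :
    ∀ (m : Nat), m ≤ cs.length → ∀ (count : List Int) (distinct : Int),
    pvCountInv count (cs.drop m) → distinct = (pvDc (cs.drop m) : Int) →
    ∀ (js : Nat), js < m →
    ((pvDc (cs.drop (js + 1)) : Int) = K ∧ (pvDc (cs.drop js) : Int) = K + 1) →
    (∀ j : Nat, js < j → j < m → ¬ ((pvDc (cs.drop (j + 1)) : Int) = K ∧ (pvDc (cs.drop j) : Int) = K + 1)) →
    ∃ count', solLoop1 cs K (PySem.List.pyRange ((m : Int) - 1) (-1) (-1)) count distinct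
      = .inl ((js : Int), count', K) ∧ pvCountInv count' (cs.drop (js + 1)) := by
  intro m
  induction m with
  | zero => intro _ _ _ _ _ js hjs _ _; omega
  | succ m ih =>
    intro hm count distinct hcnt hd js hjs hB hmax
    have hmn : m < cs.length := by omega
    have hch : PySem.List.pyGetD cs ((m : Nat) : Int) ' ' = cs[m] :=
      PySem.List.pyGetD_eq_getElem _ _ (by omega) (by exact_mod_cast hmn)
    obtain ⟨hlow1, hlow2⟩ := hlc cs[m] (List.getElem_mem hmn)
    have hdropm : cs.drop m = cs[m] :: cs.drop (m + 1) := List.drop_eq_getElem_cons hmn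
    have hcounts : ∀ x : Char, 'a' ≤ x → x ≤ 'z' →
        ((cs.drop m).count x : Int) = ((cs.drop (m + 1)).count x : Int) +
          (if x = cs[m] then 1 else 0) := by
      intro x _ _
      rw [hdropm, List.count_cons]
      by_cases hx : x = cs[m]
      · simp [hx]
      · have hyx : ¬ cs[m] = x := fun h => hx h.symm
        simp [hx, hyx]
    have hgetc : PySem.List.pyGetD count ((cs[m].toNat : Int) - 97) 0
        = ((cs.drop (m + 1)).count cs[m] : Int) := hcnt.2 _ hlow1 hlow2
    rw [show ((m + 1 : Nat) : Int) - 1 = (m : Int) by omega,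
        PySem.List.pyRange_neg_one_cons (by omega : (-1 : Int) < (m : Int))]
    simp only [solLoop1, hch]
    by_cases hjm : js = m
    · subst hjm
      have hnot : cs[js] ∉ cs.drop (js + 1) := by
        intro hmem
        have := pvDc_mid_mem (l := []) (l' := cs.drop (js + 1)) (by simpa using hmem)
        simp only [List.nil_append] at this
        rw [← hdropm] at this
        omega
      have hcond : distinct = K ∧ PySem.List.pyGetD count ((cs[js].toNat : Int) - 97) 0 = 0 := by
        constructor
        · rw [hd]; exact hB.1
        · rw [hgetc]
          have hz : (cs.drop (js + 1)).count cs[js] = 0 := by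
            by_contra hnz
            exact hnot ((pvMem_iff_count _ _).mpr hnz)
          omega
      rw [if_pos hcond]
      refine ⟨count, ?_, hcnt⟩
      rw [hd, hB.1]
    · have hjsm : js < m := by omega
      have hnobrk : ¬ (distinct = K ∧ PySem.List.pyGetD count ((cs[m].toNat : Int) - 97) 0 = 0) := by
        rintro ⟨hdk, hz⟩
        rw [hgetc] at hz
        have hnot : cs[m] ∉ cs.drop (m + 1) := by
          rw [pvMem_iff_count]; omega
        have := pvDc_mid_not_mem (l := []) (l' := cs.drop (m + 1)) hnot
        simp only [List.nil_append] at this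
        rw [← hdropm] at this
        exact hmax m hjsm (by omega) ⟨by omega, by omega⟩
      rw [if_neg hnobrk]
      have hcnt1 := pvCountInv_upd 1 hcnt hlow1 hlow2 hcounts
      have hget1 : PySem.List.pyGetD (PySem.List.pySetD count ((cs[m].toNat : Int) - 97)
          (PySem.List.pyGetD count ((cs[m].toNat : Int) - 97) 0 + 1)) ((cs[m].toNat : Int) - 97) 0
          = ((cs.drop m).count cs[m] : Int) := hcnt1.2 _ hlow1 hlow2
      have hcountm : ((cs.drop m).count cs[m] : Int)
          = ((cs.drop (m + 1)).count cs[m] : Int) + 1 := by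
        rw [hcounts cs[m] hlow1 hlow2, if_pos rfl]
      by_cases hnew : cs[m] ∈ cs.drop (m + 1)
      · have hone : ¬ (PySem.List.pyGetD (PySem.List.pySetD count ((cs[m].toNat : Int) - 97)
            (PySem.List.pyGetD count ((cs[m].toNat : Int) - 97) 0 + 1)) ((cs[m].toNat : Int) - 97) 0 = 1) := by
          rw [hget1, hcountm]
          have := (pvMem_iff_count _ _).mp hnew
          omega
        rw [if_neg hone]
        apply ih (by omega) _ _ hcnt1 ?_ js hjsm hB (fun j hj1 hj2 => hmax j hj1 (by omega))
        have := pvDc_mid_mem (l := []) (l' := cs.drop (m + 1)) (by simpa using hnew)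
        simp only [List.nil_append] at this
        rw [← hdropm] at this
        rw [hd, this]
      · have hone : PySem.List.pyGetD (PySem.List.pySetD count ((cs[m].toNat : Int) - 97)
            (PySem.List.pyGetD count ((cs[m].toNat : Int) - 97) 0 + 1)) ((cs[m].toNat : Int) - 97) 0 = 1 := by
          rw [hget1, hcountm]
          have hz : (cs.drop (m + 1)).count cs[m] = 0 := by
            by_contra hnz
            exact hnew ((pvMem_iff_count _ _).mpr hnz)
          omega
        rw [if_pos hone]
        apply ih (by omega) _ _ hcnt1 ?_ js hjsm hB (fun j hj1 hj2 => hmax j hj1 (by omega))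
        have := pvDc_mid_not_mem (l := []) (l' := cs.drop (m + 1)) (by simpa using hnew)
        simp only [List.nil_append] at this
        rw [← hdropm] at this
        rw [hd, this]
        push_cast
        ring

-- ---- port A: the two-pointer sweep (loop 2) ----

lemma pvLoop2_run (cs : List Char) (K : Int) (hlc : ∀ c ∈ cs, 'a' ≤ c ∧ c ≤ 'z')
    (hK0 : 0 ≤ K) (hKD : K < (pvDc cs : Int)) :
    ∀ (fuel : Nat) (count : List Int) (distinct ret : Int) (l r : Nat),
    (2 * (cs.length : Int) - l - r ≤ (fuel : Int)) →
    l ≤ r + 1 → r < cs.length →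
    pvCountInv count (cs.take l ++ cs.drop (r + 1)) →
    distinct = (pvDc (cs.take l ++ cs.drop (r + 1)) : Int) →
    (distinct = K ∨ distinct = K + 1) →
    (∃ i j, pvGood cs K i j ∧ ret = j - i + 1) →
    (∀ i j, pvGood cs K i j → ret ≤ j - i + 1 ∨ ((l : Int) ≤ i ∧ (r : Int) ≤ j)) →
    (distinct = K → ret ≤ (r : Int) - l + 1) →
    pvIsMin cs K (solLoop2 cs K fuel count distinct (l : Int) (r : Int) ret) := by
  intro fuel
  induction fuel with
  | zero =>
    intro count distinct ret l r hfuel hlr hrn _ _ _ _ _ _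
    exfalso
    have h1 : (l : Int) ≤ (r : Int) + 1 := by exact_mod_cast Nat.cast_le.mpr hlr
    have h2 : (r : Int) < (cs.length : Int) := by exact_mod_cast hrn
    omega
  | succ fuel ih =>
    intro count distinct ret l r hfuel hlr hrn hcnt hd hdk hex hcomp hrk
    simp only [solLoop2]
    by_cases hdist : distinct = K
    · -- shrink branch: move the left edge of the window right
      rw [if_pos hdist]
      have hlR : l ≤ r := by
        by_contra hcon
        have hleq : l = r + 1 := by omega
        rw [hleq, List.take_append_drop] at hd
        omega
      have hln : l < cs.length := by omega
      have hidx : ((l : Int) + 1 - 1) = ((l : Nat) : Int) := by ring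
      have hch : PySem.List.pyGetD cs ((l : Nat) : Int) ' ' = cs[l] :=
        PySem.List.pyGetD_eq_getElem _ _ (by omega) (by exact_mod_cast hln)
      obtain ⟨hlow1, hlow2⟩ := hlc cs[l] (List.getElem_mem hln)
      have htake : cs.take (l + 1) = cs.take l ++ [cs[l]] := by
        rw [List.take_add_one, List.getElem?_eq_getElem hln]
        rfl
      have hrem1 : cs.take (l + 1) ++ cs.drop (r + 1)
          = cs.take l ++ cs[l] :: cs.drop (r + 1) := by
        rw [htake, List.append_assoc]
        rfl
      have hcounts : ∀ x : Char, 'a' ≤ x → x ≤ 'z' →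
          ((cs.take (l + 1) ++ cs.drop (r + 1)).count x : Int)
            = ((cs.take l ++ cs.drop (r + 1)).count x : Int) + (if x = cs[l] then 1 else 0) := by
        intro x _ _
        rw [hrem1, pvMidCount]
        push_cast
        split <;> omega
      have hcnt1 := pvCountInv_upd 1 hcnt hlow1 hlow2 hcounts
      have hget1 : PySem.List.pyGetD (PySem.List.pySetD count ((cs[l].toNat : Int) - 97)
          (PySem.List.pyGetD count ((cs[l].toNat : Int) - 97) 0 + 1)) ((cs[l].toNat : Int) - 97) 0
          = ((cs.take (l + 1) ++ cs.drop (r + 1)).count cs[l] : Int) := hcnt1.2 _ hlow1 hlow2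
      have hcountl : ((cs.take (l + 1) ++ cs.drop (r + 1)).count cs[l] : Int)
          = ((cs.take l ++ cs.drop (r + 1)).count cs[l] : Int) + 1 := by
        rw [hcounts cs[l] hlow1 hlow2, if_pos rfl]
      rw [hidx, hch]
      have hcastl : ((l : Nat) : Int) + 1 = ((l + 1 : Nat) : Int) := by push_cast; ring
      by_cases hnew : cs[l] ∈ cs.take l ++ cs.drop (r + 1)
      · -- the released character was already present: the window shrinks and stays valid
        have hone : ¬ (PySem.List.pyGetD (PySem.List.pySetD count ((cs[l].toNat : Int) - 97)
            (PySem.List.pyGetD count ((cs[l].toNat : Int) - 97) 0 + 1)) ((cs[l].toNat : Int) - 97) 0 = 1) := by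
          rw [hget1, hcountl]
          have := (pvMem_iff_count _ _).mp hnew
          omega
        rw [if_neg hone]
        have hdc1 : pvDc (cs.take (l + 1) ++ cs.drop (r + 1))
            = pvDc (cs.take l ++ cs.drop (r + 1)) := by
          rw [hrem1]; exact pvDc_mid_mem hnew
        have hllt : l < r := by
          by_contra hcon
          have hleq : l = r := by omega
          have : cs.take (l + 1) ++ cs.drop (r + 1) = cs := by
            rw [hleq, List.take_append_drop]
          rw [this] at hdc1
          omega
        have hgoodnew : pvGood cs K ((l + 1 : Nat) : Int) ((r : Nat) : Int) := by
          refine ⟨by omega, by exact_mod_cast Nat.cast_le.mpr (by omega : l + 1 ≤ r), by exact_mod_cast hrn, ?_⟩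
          rw [pvRem_nat, hdc1, ← hd, hdist]
        have hres := ih (PySem.List.pySetD count ((cs[l].toNat : Int) - 97) (PySem.List.pyGetD count ((cs[l].toNat : Int) - 97) 0 + 1)) (distinct) (min ret ((r : Int) - ((l + 1 : Nat) : Int) + 1)) (l + 1) r
          (by push_cast; push_cast at hfuel; omega) (by omega) hrn hcnt1
          (by rw [hdc1, ← hd])
          (by left; exact hdist)
          (by
            rcases le_total ret ((r : Int) - ((l + 1 : Nat) : Int) + 1) with hmm | hmm
            · rw [min_eq_left hmm]; exact hex
            · rw [min_eq_right hmm]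
              exact ⟨((l + 1 : Nat) : Int), ((r : Nat) : Int), hgoodnew, rfl⟩)
          (by
            intro i j hg
            rcases hcomp i j hg with hle | ⟨hli, hrj⟩
            · exact Or.inl (le_trans (min_le_left _ _) hle)
            · by_cases hl1 : ((l + 1 : Nat) : Int) ≤ i
              · exact Or.inr ⟨hl1, hrj⟩
              · have hieq : i = ((l : Nat) : Int) := by push_cast at hl1; omega
                left
                have hretle := hrk hdist
                calc min ret ((r : Int) - ((l + 1 : Nat) : Int) + 1) ≤ ret := min_le_left _ _
                  _ ≤ (r : Int) - l + 1 := hretle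
                  _ ≤ j - i + 1 := by rw [hieq]; omega)
          (fun _ => min_le_right _ _)
        rw [hcastl]
        exact hres
      · -- the released character is new: the remainder now has K + 1 distinct characters
        have hone : PySem.List.pyGetD (PySem.List.pySetD count ((cs[l].toNat : Int) - 97)
            (PySem.List.pyGetD count ((cs[l].toNat : Int) - 97) 0 + 1)) ((cs[l].toNat : Int) - 97) 0 = 1 := by
          rw [hget1, hcountl]
          have hz : (cs.take l ++ cs.drop (r + 1)).count cs[l] = 0 := by
            by_contra hnz
            exact hnew ((pvMem_iff_count _ _).mpr hnz)
          omega
        rw [if_pos hone]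
        have hdc1 : pvDc (cs.take (l + 1) ++ cs.drop (r + 1))
            = pvDc (cs.take l ++ cs.drop (r + 1)) + 1 := by
          rw [hrem1]; exact pvDc_mid_not_mem hnew
        have hres := ih (PySem.List.pySetD count ((cs[l].toNat : Int) - 97) (PySem.List.pyGetD count ((cs[l].toNat : Int) - 97) 0 + 1)) (distinct + 1) ret (l + 1) r
          (by push_cast; push_cast at hfuel; omega) (by omega) hrn hcnt1
          (by rw [hdc1]; push_cast; omega)
          (by right; omega)
          hex
          (by
            intro i j hg
            rcases hcomp i j hg with hle | ⟨hli, hrj⟩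
            · exact Or.inl hle
            · by_cases hl1 : ((l + 1 : Nat) : Int) ≤ i
              · exact Or.inr ⟨hl1, hrj⟩
              · have hieq : i = ((l : Nat) : Int) := by push_cast at hl1; omega
                left
                have hretle := hrk hdist
                calc ret ≤ (r : Int) - l + 1 := hretle
                  _ ≤ j - i + 1 := by rw [hieq]; omega)
          (by intro hcon; omega)
        rw [hcastl]
        exact hres
    · -- eat branch: move the right edge of the window right
      rw [if_neg hdist]
      have hdist1 : distinct = K + 1 := by
        rcases hdk with h | h
        · exact absurd h hdist
        · exact h
      by_cases hend : ((r : Int) + 1) ≥ (cs.length : Int)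
      · -- the window cannot grow: the sweep is over and ret is the minimum
        rw [if_pos hend]
        have hrend : r + 1 = cs.length := by omega
        refine ⟨hex, ?_⟩
        intro i j hg
        rcases hcomp i j hg with hle | ⟨hli, hrj⟩
        · exact hle
        · exfalso
          obtain ⟨hgi, hgij, hgjn, hgdc⟩ := hg
          have hjeq : j.toNat = r := by omega
          have hrem : pvRem cs i j = cs.take i.toNat := by
            rw [pvRem, show (j + 1).toNat = j.toNat + 1 by omega, hjeq, hrend,
                List.drop_length, List.append_nil]
          have hdropn : cs.drop (r + 1) = [] := by
            rw [hrend]; exact List.drop_length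
          rw [hdropn, List.append_nil] at hd
          have hmono : pvDc (cs.take l) ≤ pvDc (cs.take i.toNat) :=
            Finset.card_le_card (pvTake_fs_mono cs (by omega))
          rw [hrem] at hgdc
          omega
      · rw [if_neg hend]
        have hr1n : r + 1 < cs.length := by omega
        have hcastr : ((r : Nat) : Int) + 1 = ((r + 1 : Nat) : Int) := by push_cast; ring
        have hch : PySem.List.pyGetD cs ((r : Int) + 1) ' ' = cs[r + 1] := by
          rw [hcastr]
          exact PySem.List.pyGetD_eq_getElem _ _ (by omega) (by exact_mod_cast hr1n)
        obtain ⟨hlow1, hlow2⟩ := hlc cs[r + 1] (List.getElem_mem hr1n)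
        have hdropr : cs.drop (r + 1) = cs[r + 1] :: cs.drop (r + 1 + 1) :=
          List.drop_eq_getElem_cons hr1n
        have hremA : cs.take l ++ cs.drop (r + 1)
            = cs.take l ++ cs[r + 1] :: cs.drop (r + 1 + 1) := by rw [hdropr]
        have hcounts : ∀ x : Char, 'a' ≤ x → x ≤ 'z' →
            ((cs.take l ++ cs.drop (r + 1 + 1)).count x : Int)
              = ((cs.take l ++ cs.drop (r + 1)).count x : Int) + (if x = cs[r + 1] then -1 else 0) := by
          intro x _ _
          rw [hremA, pvMidCount]
          push_cast
          split <;> omega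
        have hcnt1 := pvCountInv_upd (-1) hcnt hlow1 hlow2 hcounts
        have hget1 : PySem.List.pyGetD (PySem.List.pySetD count ((cs[r + 1].toNat : Int) - 97)
            (PySem.List.pyGetD count ((cs[r + 1].toNat : Int) - 97) 0 + (-1))) ((cs[r + 1].toNat : Int) - 97) 0
            = ((cs.take l ++ cs.drop (r + 1 + 1)).count cs[r + 1] : Int) := hcnt1.2 _ hlow1 hlow2
        have hcountr : ((cs.take l ++ cs.drop (r + 1 + 1)).count cs[r + 1] : Int)
            = ((cs.take l ++ cs.drop (r + 1)).count cs[r + 1] : Int) - 1 := by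
          rw [hcounts cs[r + 1] hlow1 hlow2, if_pos rfl]
          ring
        rw [hch]
        have hcomp' : ∀ (ret' : Int), (∀ i j, pvGood cs K i j → ret ≤ j - i + 1 → ret' ≤ j - i + 1) →
            ∀ i j, pvGood cs K i j → ret' ≤ j - i + 1 ∨ (((l : Nat) : Int) ≤ i ∧ ((r + 1 : Nat) : Int) ≤ j) := by
          intro ret' hr' i j hg
          rcases hcomp i j hg with hle | ⟨hli, hrj⟩
          · exact Or.inl (hr' i j hg hle)
          · by_cases hjr : ((r + 1 : Nat) : Int) ≤ j
            · exact Or.inr ⟨hli, hjr⟩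
            · exfalso
              obtain ⟨hgi, hgij, hgjn, hgdc⟩ := hg
              have hjeq : j.toNat = r := by push_cast at hjr; omega
              have hrem : pvRem cs i j = cs.take i.toNat ++ cs.drop (r + 1) := by
                rw [pvRem, show (j + 1).toNat = j.toNat + 1 by omega, hjeq]
              have hmono := pvDc_rem_mono_i cs (r + 1) (by omega : l ≤ i.toNat)
              rw [hrem] at hgdc
              omega
        by_cases hzero : cs[r + 1] ∈ cs.take l ++ cs.drop (r + 1 + 1)
        · -- the eaten character still occurs elsewhere: the remainder keeps K + 1 distinct
          have hone : ¬ (PySem.List.pyGetD (PySem.List.pySetD count ((cs[r + 1].toNat : Int) - 97)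
              (PySem.List.pyGetD count ((cs[r + 1].toNat : Int) - 97) 0 - 1)) ((cs[r + 1].toNat : Int) - 97) 0 = 0) := by
            have hg1 : PySem.List.pyGetD count ((cs[r + 1].toNat : Int) - 97) 0 - 1
                = PySem.List.pyGetD count ((cs[r + 1].toNat : Int) - 97) 0 + (-1) := by ring
            rw [hg1, hget1, hcountr]
            have := (pvMem_iff_count _ _).mp hzero
            have h2 := hcounts cs[r + 1] hlow1 hlow2
            rw [if_pos rfl] at h2
            omega
          rw [if_neg hone]
          have hdc1 : pvDc (cs.take l ++ cs.drop (r + 1))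
              = pvDc (cs.take l ++ cs.drop (r + 1 + 1)) := by
            rw [hremA]; exact pvDc_mid_mem hzero
          have hres := ih (PySem.List.pySetD count ((cs[r + 1].toNat : Int) - 97) (PySem.List.pyGetD count ((cs[r + 1].toNat : Int) - 97) 0 - 1)) distinct ret l (r + 1)
            (by push_cast; push_cast at hfuel; omega) (by omega) hr1n
            (by
              have hg1 : PySem.List.pyGetD count ((cs[r + 1].toNat : Int) - 97) 0 - 1
                  = PySem.List.pyGetD count ((cs[r + 1].toNat : Int) - 97) 0 + (-1) := by ring
              rw [hg1]
              exact hcnt1)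
            (by rw [← hdc1]; exact hd)
            hdk
            hex
            (hcomp' ret (fun i j _ hle => hle))
            (fun hcon => absurd hcon hdist)
          rw [hcastr]
          exact hres
        · -- the eaten character disappears from the remainder: exactly K distinct remain
          have hone : PySem.List.pyGetD (PySem.List.pySetD count ((cs[r + 1].toNat : Int) - 97)
              (PySem.List.pyGetD count ((cs[r + 1].toNat : Int) - 97) 0 - 1)) ((cs[r + 1].toNat : Int) - 97) 0 = 0 := by
            have hg1 : PySem.List.pyGetD count ((cs[r + 1].toNat : Int) - 97) 0 - 1
                = PySem.List.pyGetD count ((cs[r + 1].toNat : Int) - 97) 0 + (-1) := by ring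
            rw [hg1, hget1, hcountr]
            have hz : (cs.take l ++ cs.drop (r + 1 + 1)).count cs[r + 1] = 0 := by
              by_contra hnz
              exact hzero ((pvMem_iff_count _ _).mpr hnz)
            have h2 := hcounts cs[r + 1] hlow1 hlow2
            rw [if_pos rfl] at h2
            omega
          rw [if_pos hone]
          have hdc1 : pvDc (cs.take l ++ cs.drop (r + 1))
              = pvDc (cs.take l ++ cs.drop (r + 1 + 1)) + 1 := by
            rw [hremA]; exact pvDc_mid_not_mem hzero
          have hdcB : (pvDc (cs.take l ++ cs.drop (r + 1 + 1)) : Int) = K := by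
            rw [hdist1] at hd
            omega
          have hgoodnew : pvGood cs K ((l : Nat) : Int) ((r + 1 : Nat) : Int) := by
            refine ⟨by omega, by exact_mod_cast Nat.cast_le.mpr (by omega : l ≤ r + 1),
              by exact_mod_cast hr1n, ?_⟩
            rw [pvRem_nat]
            exact hdcB
          have hres := ih (PySem.List.pySetD count ((cs[r + 1].toNat : Int) - 97) (PySem.List.pyGetD count ((cs[r + 1].toNat : Int) - 97) 0 - 1)) (distinct - 1) (min ret (((r + 1 : Nat) : Int) - (l : Int) + 1)) l (r + 1)
            (by push_cast; push_cast at hfuel; omega) (by omega) hr1n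
            (by
              have hg1 : PySem.List.pyGetD count ((cs[r + 1].toNat : Int) - 97) 0 - 1
                  = PySem.List.pyGetD count ((cs[r + 1].toNat : Int) - 97) 0 + (-1) := by ring
              rw [hg1]
              exact hcnt1)
            (by rw [hdist1, hdcB]; ring)
            (by left; omega)
            (by
              rcases le_total ret (((r + 1 : Nat) : Int) - (l : Int) + 1) with hmm | hmm
              · rw [min_eq_left hmm]; exact hex
              · rw [min_eq_right hmm]
                exact ⟨((l : Nat) : Int), ((r + 1 : Nat) : Int), hgoodnew, rfl⟩)
            (hcomp' _ (fun i j _ hle => le_trans (min_le_left _ _) hle))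
            (fun _ => min_le_right _ _)
          rw [hcastr]
          exact hres

-- ---- port B: suffix distinct sets ----

def pvSfx : List Char → PySem.Set Char
  | [] => PySem.Set.empty
  | c :: t => PySem.Set.union (pvSfx t) (PySem.Set.ofList [c])

lemma pvSfx_mem (l : List Char) (x : Char) : x ∈ pvSfx l ↔ x ∈ l := by
  induction l with
  | nil => simp [pvSfx, PySem.Set.empty]
  | cons c t ih =>
    rw [pvSfx, PySem.Set.mem_union, ih, PySem.Set.mem_ofList]
    simp [or_comm]

lemma pvSfx_nodup (l : List Char) : (pvSfx l).Nodup := by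
  induction l with
  | nil => exact List.nodup_nil
  | cons c t ih => exact PySem.Set.nodup_union _ _ ih

lemma pvSetLen_eq_dc {s : PySem.Set Char} {L : List Char}
    (hnd : s.Nodup) (hmem : ∀ x, x ∈ s ↔ x ∈ L) :
    PySem.Set.len s = (pvDc L : Int) := by
  have h1 : s.toFinset = L.toFinset := by
    apply Finset.ext; intro x; simp only [List.mem_toFinset]; exact hmem x
  have h2 : s.toFinset.card = s.length := List.toFinset_card_of_nodup hnd
  show (s.length : Int) = _
  rw [← h2, h1]; rfl

lemma pvSufBuild (cs : List Char) :
    ∀ (m : Nat), m ≤ cs.length → ∀ (arr : List (PySem.Set Char)),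
    arr.length = cs.length + 1 →
    (∀ k : Nat, m ≤ k → k ≤ cs.length →
      PySem.List.pyGetD arr (k : Int) PySem.Set.empty = pvSfx (cs.drop k)) →
    ((PySem.List.pyRange ((m : Int) - 1) (-1) (-1)).foldl
      (fun suf j => PySem.List.pySetD suf j
        (PySem.Set.union (PySem.List.pyGetD suf (j + 1) PySem.Set.empty)
          (PySem.Set.ofList [PySem.List.pyGetD cs j ' '])))
      arr).length = cs.length + 1 ∧
    (∀ k : Nat, k ≤ cs.length →
      PySem.List.pyGetD ((PySem.List.pyRange ((m : Int) - 1) (-1) (-1)).foldl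
      (fun suf j => PySem.List.pySetD suf j
        (PySem.Set.union (PySem.List.pyGetD suf (j + 1) PySem.Set.empty)
          (PySem.Set.ofList [PySem.List.pyGetD cs j ' '])))
      arr) (k : Int) PySem.Set.empty = pvSfx (cs.drop k)) := by
  intro m
  induction m with
  | zero =>
    intro _ arr hlen hinv
    rw [PySem.List.pyRange_neg_one_eq_nil (by omega)]
    exact ⟨hlen, fun k hk => hinv k (Nat.zero_le k) hk⟩
  | succ m ih =>
    intro hm arr hlen hinv
    have hmn : m < cs.length := by omega
    rw [show ((m + 1 : Nat) : Int) - 1 = (m : Int) by omega,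
        PySem.List.pyRange_neg_one_cons (by omega : (-1 : Int) < (m : Int)), List.foldl_cons]
    apply ih (by omega)
    · rw [PySem.List.length_pySetD]; exact hlen
    · intro k hk1 hk2
      have harr : m < arr.length := by omega
      by_cases hkm : k = m
      · subst hkm
        rw [PySem.List.pyGetD_pySetD_natCast _ _ _ _ _ harr, if_pos rfl]
        rw [show ((k : Int) + 1) = ((k + 1 : Nat) : Int) by omega]
        rw [hinv (k + 1) (le_refl _) (by omega)]
        rw [PySem.List.pyGetD_eq_getElem _ _ (by omega) (by exact_mod_cast hmn)]
        rw [List.drop_eq_getElem_cons hmn, pvSfx]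
        simp
      · rw [PySem.List.pyGetD_pySetD_natCast _ _ _ _ _ harr, if_neg hkm]
        exact hinv k (by omega) hk2

-- ---- port B: the binary search ----

lemma pvAltBS_spec (suf : List (PySem.Set Char)) (pre : PySem.Set Char) (K : Int) :
    ∀ (lo hi : Int), lo ≤ hi →
    (∀ x y : Int, lo ≤ x → x ≤ y → y ≤ hi →
      (PySem.Set.len (PySem.Set.union pre (PySem.List.pyGetD suf (x + 1) PySem.Set.empty)) ≤ K) →
      (PySem.Set.len (PySem.Set.union pre (PySem.List.pyGetD suf (y + 1) PySem.Set.empty)) ≤ K)) →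
    (PySem.Set.len (PySem.Set.union pre (PySem.List.pyGetD suf (hi + 1) PySem.Set.empty)) ≤ K) →
    lo ≤ altBS suf pre K lo hi ∧ altBS suf pre K lo hi ≤ hi ∧
    (PySem.Set.len (PySem.Set.union pre
      (PySem.List.pyGetD suf (altBS suf pre K lo hi + 1) PySem.Set.empty)) ≤ K) ∧
    (∀ x : Int, lo ≤ x → x < altBS suf pre K lo hi →
      ¬ (PySem.Set.len (PySem.Set.union pre (PySem.List.pyGetD suf (x + 1) PySem.Set.empty)) ≤ K)) := by
  have main : ∀ (fuelN : Nat) (lo hi : Int), (hi - lo).toNat ≤ fuelN → lo ≤ hi →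
      (∀ x y : Int, lo ≤ x → x ≤ y → y ≤ hi →
        (PySem.Set.len (PySem.Set.union pre (PySem.List.pyGetD suf (x + 1) PySem.Set.empty)) ≤ K) →
        (PySem.Set.len (PySem.Set.union pre (PySem.List.pyGetD suf (y + 1) PySem.Set.empty)) ≤ K)) →
      (PySem.Set.len (PySem.Set.union pre (PySem.List.pyGetD suf (hi + 1) PySem.Set.empty)) ≤ K) →
      lo ≤ altBS suf pre K lo hi ∧ altBS suf pre K lo hi ≤ hi ∧
      (PySem.Set.len (PySem.Set.union pre
        (PySem.List.pyGetD suf (altBS suf pre K lo hi + 1) PySem.Set.empty)) ≤ K) ∧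
      (∀ x : Int, lo ≤ x → x < altBS suf pre K lo hi →
        ¬ (PySem.Set.len (PySem.Set.union pre (PySem.List.pyGetD suf (x + 1) PySem.Set.empty)) ≤ K)) := by
    intro fuelN
    induction fuelN with
    | zero =>
      intro lo hi hf hle hmono hQhi
      have hlohi : lo = hi := by omega
      subst hlohi
      rw [altBS]
      simp only [lt_irrefl, dite_false]
      exact ⟨le_refl _, le_refl _, hQhi, fun x hx1 hx2 => by omega⟩
    | succ fn ih =>
      intro lo hi hf hle hmono hQhi
      rw [altBS]
      by_cases hlt : lo < hi
      · simp only [hlt, dite_true]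
        have hmid := PySem.Int.floordiv_two_mid_bounds (le_of_lt hlt)
        have hmidlt : PySem.Int.floordiv (lo + hi) 2 < hi :=
          (PySem.Int.floordiv_lt_iff_lt_mul (a := lo + hi) (b := 2) (q := hi) (by omega)).mpr (by omega)
        set mid := PySem.Int.floordiv (lo + hi) 2 with hmiddef
        by_cases hQ : (PySem.Set.len (PySem.Set.union pre (PySem.List.pyGetD suf (mid + 1) PySem.Set.empty)) ≤ K)
        · simp only [hQ, if_true]
          have hrec := ih lo mid (by omega) (by omega)
            (fun x y hx hxy hy hq => hmono x y hx hxy (by omega) hq) hQ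
          exact ⟨hrec.1, by omega, hrec.2.2.1, hrec.2.2.2⟩
        · simp only [hQ, if_false]
          have hrec := ih (mid + 1) hi (by omega) (by omega)
            (fun x y hx hxy hy hq => hmono x y (by omega) hxy hy hq) hQhi
          refine ⟨by omega, hrec.2.1, hrec.2.2.1, ?_⟩
          intro x hx1 hx2
          by_cases hxm : x ≤ mid
          · intro hq
            exact hQ (hmono x mid hx1 hxm (by omega) hq)
          · exact hrec.2.2.2 x (by omega) hx2
      · simp only [hlt, dite_false]
        have hlohi : lo = hi := by omega
        subst hlohi
        exact ⟨le_refl _, le_refl _, hQhi, fun x hx1 hx2 => by omega⟩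
  intro lo hi hle hmono hQhi
  exact main (hi - lo).toNat lo hi (le_refl _) hle hmono hQhi

-- ---- port B: the main fold ----

lemma pvAltFold (cs : List Char) (K : Int) (suf : List (PySem.Set Char))
    (hsuf : ∀ k : Nat, k ≤ cs.length →
      PySem.List.pyGetD suf (k : Int) PySem.Set.empty = pvSfx (cs.drop k))
    (hK0 : 0 ≤ K) (hKD : K < (pvDc cs : Int)) :
    ∀ (i0 : Nat), i0 ≤ cs.length → ∀ (best : Int) (pre : PySem.Set Char),
    (∀ x, x ∈ pre ↔ x ∈ cs.take i0) → pre.Nodup →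
    (∀ i j : Int, pvGood cs K i j → i < i0 → best ≤ j - i + 1) →
    best ≤ (cs.length : Int) →
    (best = (cs.length : Int) ∨ ∃ i j, pvGood cs K i j ∧ best = j - i + 1) →
    (∀ i j : Int, pvGood cs K i j →
      ((PySem.List.pyRange (i0 : Int) (cs.length : Int) 1).foldl
        (fun (st : Int × PySem.Set Char) i =>
          (if PySem.Set.len st.2 ≤ K then
              min st.1 (altBS suf st.2 K i ((cs.length : Int) - 1) - i + 1)
            else st.1, PySem.Set.add st.2 (PySem.List.pyGetD cs i ' ')))
        (best, pre)).1 ≤ j - i + 1) ∧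
    (((PySem.List.pyRange (i0 : Int) (cs.length : Int) 1).foldl
        (fun (st : Int × PySem.Set Char) i =>
          (if PySem.Set.len st.2 ≤ K then
              min st.1 (altBS suf st.2 K i ((cs.length : Int) - 1) - i + 1)
            else st.1, PySem.Set.add st.2 (PySem.List.pyGetD cs i ' ')))
        (best, pre)).1 ≤ (cs.length : Int)) ∧
    (((PySem.List.pyRange (i0 : Int) (cs.length : Int) 1).foldl
        (fun (st : Int × PySem.Set Char) i =>
          (if PySem.Set.len st.2 ≤ K then
              min st.1 (altBS suf st.2 K i ((cs.length : Int) - 1) - i + 1)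
            else st.1, PySem.Set.add st.2 (PySem.List.pyGetD cs i ' ')))
        (best, pre)).1 = (cs.length : Int) ∨
      ∃ i j, pvGood cs K i j ∧
        ((PySem.List.pyRange (i0 : Int) (cs.length : Int) 1).foldl
        (fun (st : Int × PySem.Set Char) i =>
          (if PySem.Set.len st.2 ≤ K then
              min st.1 (altBS suf st.2 K i ((cs.length : Int) - 1) - i + 1)
            else st.1, PySem.Set.add st.2 (PySem.List.pyGetD cs i ' ')))
        (best, pre)).1 = j - i + 1) := by
  have main : ∀ (d : Nat) (i0 : Nat), cs.length - i0 = d → i0 ≤ cs.length →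
      ∀ (best : Int) (pre : PySem.Set Char),
      (∀ x, x ∈ pre ↔ x ∈ cs.take i0) → pre.Nodup →
      (∀ i j : Int, pvGood cs K i j → i < i0 → best ≤ j - i + 1) →
      best ≤ (cs.length : Int) →
      (best = (cs.length : Int) ∨ ∃ i j, pvGood cs K i j ∧ best = j - i + 1) →
      (∀ i j : Int, pvGood cs K i j →
        ((PySem.List.pyRange (i0 : Int) (cs.length : Int) 1).foldl
          (fun (st : Int × PySem.Set Char) i =>
            (if PySem.Set.len st.2 ≤ K then
                min st.1 (altBS suf st.2 K i ((cs.length : Int) - 1) - i + 1)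
              else st.1, PySem.Set.add st.2 (PySem.List.pyGetD cs i ' ')))
          (best, pre)).1 ≤ j - i + 1) ∧
      (((PySem.List.pyRange (i0 : Int) (cs.length : Int) 1).foldl
          (fun (st : Int × PySem.Set Char) i =>
            (if PySem.Set.len st.2 ≤ K then
                min st.1 (altBS suf st.2 K i ((cs.length : Int) - 1) - i + 1)
              else st.1, PySem.Set.add st.2 (PySem.List.pyGetD cs i ' ')))
          (best, pre)).1 ≤ (cs.length : Int)) ∧
      (((PySem.List.pyRange (i0 : Int) (cs.length : Int) 1).foldl
          (fun (st : Int × PySem.Set Char) i =>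
            (if PySem.Set.len st.2 ≤ K then
                min st.1 (altBS suf st.2 K i ((cs.length : Int) - 1) - i + 1)
              else st.1, PySem.Set.add st.2 (PySem.List.pyGetD cs i ' ')))
          (best, pre)).1 = (cs.length : Int) ∨
        ∃ i j, pvGood cs K i j ∧
          ((PySem.List.pyRange (i0 : Int) (cs.length : Int) 1).foldl
          (fun (st : Int × PySem.Set Char) i =>
            (if PySem.Set.len st.2 ≤ K then
                min st.1 (altBS suf st.2 K i ((cs.length : Int) - 1) - i + 1)
              else st.1, PySem.Set.add st.2 (PySem.List.pyGetD cs i ' ')))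
          (best, pre)).1 = j - i + 1) := by
    intro d
    induction d with
    | zero =>
      intro i0 hd hi0 best pre hpre hnd hc hbn hor
      have hi0n : i0 = cs.length := by omega
      subst hi0n
      rw [PySem.List.pyRange_one_eq_nil (by omega)]
      simp only [List.foldl_nil]
      refine ⟨?_, hbn, hor⟩
      intro i j hg
      obtain ⟨hgi, hgij, hgjn, _⟩ := hg
      exact hc i j ⟨hgi, hgij, hgjn, by assumption⟩ (by omega)
    | succ d ih =>
      intro i0 hd hi0 best pre hpre hnd hc hbn hor
      have hi0n : i0 < cs.length := by clear hor; omega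
      have hd1 : cs.length - (i0 + 1) = d := by clear hor; omega
      have hi1 : i0 + 1 ≤ cs.length := by clear hor; omega
      have hch : PySem.List.pyGetD cs ((i0 : Nat) : Int) ' ' = cs[i0] :=
        PySem.List.pyGetD_eq_getElem _ _ (by omega) (by exact_mod_cast hi0n)
      have hLenEq : PySem.Set.len pre = (pvDc (cs.take i0) : Int) :=
        pvSetLen_eq_dc hnd hpre
      have htake : cs.take (i0 + 1) = cs.take i0 ++ [cs[i0]] := by
        rw [List.take_add_one, List.getElem?_eq_getElem hi0n]
        rfl
      have hpre1 : ∀ x, x ∈ PySem.Set.add pre cs[i0] ↔ x ∈ cs.take (i0 + 1) := by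
        intro x
        rw [PySem.Set.mem_add, hpre x, htake, List.mem_append, List.mem_singleton]
      have hnd1 : (PySem.Set.add pre cs[i0]).Nodup := PySem.Set.nodup_add _ _ hnd
      have hQlen : ∀ x : Int, (i0 : Int) ≤ x → x ≤ (cs.length : Int) - 1 →
          PySem.Set.len (PySem.Set.union pre (PySem.List.pyGetD suf (x + 1) PySem.Set.empty))
            = (pvDc (cs.take i0 ++ cs.drop (x.toNat + 1)) : Int) := by
        intro x hx1 hx2
        have hx0 : (0 : Int) ≤ x := le_trans (by omega) hx1
        have hcast : x + 1 = ((x.toNat + 1 : Nat) : Int) := by omega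
        rw [hcast, hsuf (x.toNat + 1) (by omega)]
        apply pvSetLen_eq_dc (PySem.Set.nodup_union _ _ hnd)
        intro y
        rw [PySem.Set.mem_union, pvSfx_mem, hpre y, List.mem_append]
      rw [PySem.List.pyRange_one_cons (by exact_mod_cast hi0n), List.foldl_cons]
      by_cases hL : PySem.Set.len pre ≤ K
      · -- the prefix still has at most K distinct characters: search for the least end
        have hBS := pvAltBS_spec suf pre K (i0 : Int) ((cs.length : Int) - 1)
          (by omega)
          (by
            intro x y hx hxy hy hq
            rw [hQlen x hx (by omega)] at hq
            rw [hQlen y (by omega) hy]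
            have := pvDc_rem_mono_j cs i0 (by omega : x.toNat + 1 ≤ y.toNat + 1)
            omega)
          (by
            rw [hQlen ((cs.length : Int) - 1) (by omega) (le_refl _)]
            have hcast : ((cs.length : Int) - 1).toNat + 1 = cs.length := by omega
            rw [hcast, List.drop_length, List.append_nil]
            omega)
        set j0 := altBS suf pre K (i0 : Int) ((cs.length : Int) - 1) with hj0
        obtain ⟨hlo, hhi, hQj0, hmin⟩ := hBS
        have hj0n : j0.toNat < cs.length := by omega
        have hQj0' : (pvDc (cs.take i0 ++ cs.drop (j0.toNat + 1)) : Int) ≤ K := by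
          rw [← hQlen j0 hlo hhi]; exact hQj0
        have hdcK : (pvDc (cs.take i0 ++ cs.drop (j0.toNat + 1)) : Int) = K := by
          rcases eq_or_lt_of_le hlo with hEq | hLt
          · -- j0 = i0 : removing one character keeps at least D - 1 distinct
            have hdiag := pvDc_diag cs hi0n
            have : i0 = j0.toNat := by omega
            rw [← this]
            rw [← this] at hQj0'
            omega
          · -- ¬Q (j0 - 1) : one step earlier there were more than K distinct
            have hnq := hmin (j0 - 1) (by omega) (by omega)
            rw [hQlen (j0 - 1) (by omega) (by omega)] at hnq
            have hcast : (j0 - 1).toNat + 1 = j0.toNat := by omega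
            rw [hcast] at hnq
            have hdropj : cs.drop j0.toNat = cs[j0.toNat] :: cs.drop (j0.toNat + 1) :=
              List.drop_eq_getElem_cons hj0n
            have hstep : pvDc (cs.take i0 ++ cs.drop j0.toNat)
                ≤ pvDc (cs.take i0 ++ cs.drop (j0.toNat + 1)) + 1 := by
              rw [hdropj]; exact pvDc_mid_le ..
            omega
        have hgood : pvGood cs K ((i0 : Nat) : Int) j0 := by
          refine ⟨by omega, hlo, by omega, ?_⟩
          have hrem : pvRem cs ((i0 : Nat) : Int) j0
              = cs.take i0 ++ cs.drop (j0.toNat + 1) := by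
            rw [pvRem, show (j0 + 1).toNat = j0.toNat + 1 by omega,
                show ((i0 : Nat) : Int).toNat = i0 by omega]
          rw [hrem]; exact hdcK
        rw [if_pos hL, hch]
        have hcast1 : ((i0 : Nat) : Int) + 1 = ((i0 + 1 : Nat) : Int) := by push_cast; ring
        rw [hcast1]
        have hc1 : ∀ i j : Int, pvGood cs K i j → i < (i0 + 1 : Nat) →
            min best (j0 - ((i0 : Nat) : Int) + 1) ≤ j - i + 1 := by
          intro i j hg hlt
          by_cases hii : i < (i0 : Int)
          · exact le_trans (min_le_left _ _) (hc i j hg hii)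
          · have hieq : i = ((i0 : Nat) : Int) := by
              have hx : ((i0 + 1 : Nat) : Int) = ((i0 : Nat) : Int) + 1 := by push_cast; ring
              rw [hx] at hlt
              exact le_antisymm (Int.lt_add_one_iff.mp hlt) (not_lt.mp hii)
            subst hieq
            obtain ⟨hgi, hgij, hgjn, hgdc⟩ := hg
            have hrem : pvRem cs ((i0 : Nat) : Int) j
                = cs.take i0 ++ cs.drop (j.toNat + 1) := by
              rw [pvRem, show (j + 1).toNat = j.toNat + 1 by omega,
                  show ((i0 : Nat) : Int).toNat = i0 by omega]
            have hQj : PySem.Set.len (PySem.Set.union pre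
                (PySem.List.pyGetD suf (j + 1) PySem.Set.empty)) ≤ K := by
              rw [hQlen j hgij (by omega), ← hrem, hgdc]
            have hjge : j0 ≤ j := by
              by_contra hcon
              exact hmin j hgij (by omega) hQj
            calc min best (j0 - ((i0 : Nat) : Int) + 1) ≤ j0 - ((i0 : Nat) : Int) + 1 :=
                min_le_right _ _
              _ ≤ j - ((i0 : Nat) : Int) + 1 := by omega
        have hbn1 : min best (j0 - ((i0 : Nat) : Int) + 1) ≤ (cs.length : Int) :=
          le_trans (min_le_right _ _) (by omega)
        have hor1 : min best (j0 - ((i0 : Nat) : Int) + 1) = (cs.length : Int) ∨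
            ∃ i j, pvGood cs K i j ∧ min best (j0 - ((i0 : Nat) : Int) + 1) = j - i + 1 := by
          rcases le_total best (j0 - ((i0 : Nat) : Int) + 1) with hmm | hmm
          · rw [min_eq_left hmm]; exact hor
          · rw [min_eq_right hmm]
            exact Or.inr ⟨((i0 : Nat) : Int), j0, hgood, rfl⟩
        exact ih (i0 + 1) hd1 hi1 _ _ hpre1 hnd1 hc1 hbn1 hor1
      · -- the prefix already has more than K distinct characters: no window starts here
        rw [if_neg hL, hch]
        have hcast1 : ((i0 : Nat) : Int) + 1 = ((i0 + 1 : Nat) : Int) := by push_cast; ring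
        rw [hcast1]
        have hc1 : ∀ i j : Int, pvGood cs K i j → i < (i0 + 1 : Nat) → best ≤ j - i + 1 := by
          intro i j hg hlt
          by_cases hii : i < (i0 : Int)
          · exact hc i j hg hii
          · exfalso
            have hieq : i = ((i0 : Nat) : Int) := by
              have hx : ((i0 + 1 : Nat) : Int) = ((i0 : Nat) : Int) + 1 := by push_cast; ring
              rw [hx] at hlt
              exact le_antisymm (Int.lt_add_one_iff.mp hlt) (not_lt.mp hii)
            subst hieq
            obtain ⟨hgi, hgij, hgjn, hgdc⟩ := hg
            have hrem : pvRem cs ((i0 : Nat) : Int) j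
                = cs.take i0 ++ cs.drop (j.toNat + 1) := by
              rw [pvRem, show (j + 1).toNat = j.toNat + 1 by omega,
                  show ((i0 : Nat) : Int).toNat = i0 by omega]
            have hsub := pvDc_take_le_rem cs i0 (j.toNat + 1)
            rw [← hrem] at hsub
            rw [hLenEq] at hL
            omega
        exact ih (i0 + 1) hd1 hi1 _ _ hpre1 hnd1 hc1 hbn hor
  intro i0 hi0 best pre hpre hnd hc hbn hor
  exact main (cs.length - i0) i0 rfl hi0 best pre hpre hnd hc hbn hor

-- ---- glue: each port computes the unique minimum (or the trivial answers) ----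

lemma pvGoodExists (cs : List Char) (K : Int) (hK0 : 0 ≤ K) (hKD : K < (pvDc cs : Int)) :
    ∃ i j, pvGood cs K i j := by
  have hKn : K.toNat < pvDc cs := by omega
  obtain ⟨i, hin, hdc⟩ := pvExistsTake cs K.toNat hKn
  have hi_lt : i < cs.length := by
    rcases Nat.lt_or_ge i cs.length with h | h
    · exact h
    · exfalso
      rw [List.take_of_length_le h] at hdc
      omega
  have hn1 : 1 ≤ cs.length := by omega
  refine ⟨(i : Int), ((cs.length - 1 : Nat) : Int), ?_, ?_, ?_, ?_⟩
  · omega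
  · omega
  · omega
  · rw [pvRem_nat]
    have h2 : cs.length - 1 + 1 = cs.length := by omega
    rw [h2, List.drop_length, List.append_nil, hdc]
    omega

lemma pvReplicateEmpty (n : Nat) (k : Nat) (hk : k < n) :
    PySem.List.pyGetD (List.replicate n (PySem.Set.empty : PySem.Set Char)) (k : Int)
      PySem.Set.empty = PySem.Set.empty := by
  rw [PySem.List.pyGetD_natCast,
      List.getD_eq_getElem _ _ (by simpa using hk)]
  exact (List.mem_replicate.mp (List.getElem_mem _)).2

lemma pvSolutionB_suf (S : String) :
    ∀ k : Nat, k ≤ S.toList.length →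
      PySem.List.pyGetD ((PySem.List.pyRange ((S.toList.length : Int) - 1) (-1) (-1)).foldl
        (fun suf j => PySem.List.pySetD suf j
          (PySem.Set.union (PySem.List.pyGetD suf (j + 1) PySem.Set.empty)
            (PySem.Set.ofList [PySem.List.pyGetD S.toList j ' '])))
        (List.replicate (S.toList.length + 1) PySem.Set.empty)) (k : Int) PySem.Set.empty
      = pvSfx (S.toList.drop k) := by
  have hb := pvSufBuild S.toList S.toList.length (le_refl _)
    (List.replicate (S.toList.length + 1) PySem.Set.empty) (by simp)
    (by
      intro k hk1 hk2
      have hkn : k = S.toList.length := by omega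
      subst hkn
      rw [pvReplicateEmpty _ _ (by omega), List.drop_length, pvSfx])
  exact hb.2

lemma pvSolutionA_isMin (S : String) (K : Int) (hlc : ∀ c ∈ S.toList, 'a' ≤ c ∧ c ≤ 'z')
    (hK0 : 0 ≤ K) (hKD : K < (pvDc S.toList : Int)) :
    pvIsMin S.toList K (solution S K) := by
  set cs := S.toList with hcs
  -- the break predicate and the break position (the largest index satisfying it)
  obtain ⟨j0, hj0n, hj01, hj02⟩ := pvExistsDrop cs K.toNat (by omega)
  have hP0 : (pvDc (cs.drop (j0 + 1)) : Int) = K ∧ (pvDc (cs.drop j0) : Int) = K + 1 := by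
    constructor <;> [rw [hj01]; rw [hj02]] <;> push_cast <;> omega
  set js := Nat.findGreatest
    (fun j => (pvDc (cs.drop (j + 1)) : Int) = K ∧ (pvDc (cs.drop j) : Int) = K + 1)
    cs.length with hjs
  have hPs : (pvDc (cs.drop (js + 1)) : Int) = K ∧ (pvDc (cs.drop js) : Int) = K + 1 := by
    have h := Nat.findGreatest_spec
      (P := fun j => (pvDc (cs.drop (j + 1)) : Int) = K ∧ (pvDc (cs.drop j) : Int) = K + 1)
      (le_of_lt hj0n) hP0
    rw [← hjs] at h
    exact h
  have hjsn : js < cs.length := by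
    by_contra hge
    push Not at hge
    have h1 : cs.drop js = [] := List.drop_eq_nil_of_le hge
    have h2 : cs.drop (js + 1) = [] := List.drop_eq_nil_of_le (by omega)
    rw [h1, h2] at hPs
    omega
  have hmax : ∀ j : Nat, js < j → j < cs.length →
      ¬ ((pvDc (cs.drop (j + 1)) : Int) = K ∧ (pvDc (cs.drop j) : Int) = K + 1) := by
    intro j h1 h2
    have h1' : Nat.findGreatest
        (fun j => (pvDc (cs.drop (j + 1)) : Int) = K ∧ (pvDc (cs.drop j) : Int) = K + 1)
        cs.length < j := by rw [← hjs]; exact h1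
    exact Nat.findGreatest_is_greatest h1' (by omega)
  obtain ⟨count', hrun, hcnt'⟩ := pvLoop1_break cs K hlc cs.length (le_refl _)
    (List.replicate 26 0) 0
    (by rw [List.drop_length]; exact pvCountInv_replicate)
    (by rw [List.drop_length]; simp [pvDc]) js hjsn hPs hmax
  simp only [solution, ← hcs]
  rw [hrun]
  have hres := pvLoop2_run cs K hlc hK0 hKD (2 * cs.length + 2) count' K ((js : Int) + 1) 0 js
    (by push_cast; omega) (by omega) hjsn
    (by simpa using hcnt')
    (by simpa using hPs.1.symm)
    (Or.inl rfl)
    ⟨0, (js : Int), ⟨le_refl _, by omega, by exact_mod_cast hjsn, by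
      rw [show (0 : Int) = ((0 : Nat) : Int) by omega, pvRem_nat]
      simpa using hPs.1⟩, by omega⟩
    (by
      intro i j hg
      by_cases hjr : (js : Int) ≤ j
      · exact Or.inr ⟨by exact_mod_cast hg.1, hjr⟩
      · exfalso
        obtain ⟨hgi, hgij, hgjn, hgdc⟩ := hg
        have hj0' : 0 ≤ j := le_trans hgi hgij
        have hrem : pvRem cs i j = cs.take i.toNat ++ cs.drop (j.toNat + 1) := by
          rw [pvRem, show (j + 1).toNat = j.toNat + 1 by omega]
        have h1 : pvDc (cs.drop (j.toNat + 1)) ≤ pvDc (pvRem cs i j) := by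
          rw [hrem]; exact pvDc_drop_le_rem ..
        have h2 : pvDc (cs.drop js) ≤ pvDc (cs.drop (j.toNat + 1)) := by
          apply pvDc_drop_anti; omega
        omega)
    (fun _ => by omega)
  convert hres using 2

lemma pvSolutionA_trivial (S : String) (K : Int) (hlc : ∀ c ∈ S.toList, 'a' ≤ c ∧ c ≤ 'z')
    (h : ¬ (0 ≤ K ∧ K < (pvDc S.toList : Int))) :
    solution S K = if (pvDc S.toList : Int) = K then 0 else -1 := by
  have hnb : ∀ j : Nat, j < S.toList.length →
      ¬ ((pvDc (S.toList.drop (j + 1)) : Int) = K ∧ (pvDc (S.toList.drop j) : Int) = K + 1) := by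
    rintro j hj ⟨h1, h2⟩
    have h3 : pvDc (S.toList.drop j) ≤ pvDc S.toList := by
      have := pvDc_drop_anti S.toList (Nat.zero_le j)
      simpa using this
    exact h ⟨by omega, by omega⟩
  have h1 := pvLoop1_nobreak S.toList K hlc S.toList.length (le_refl _) (List.replicate 26 0) 0
    (by rw [List.drop_length]; exact pvCountInv_replicate)
    (by rw [List.drop_length]; simp [pvDc]) hnb
  simp only [solution]
  rw [h1]

lemma pvSolutionB_isMin (S : String) (K : Int)
    (hK0 : 0 ≤ K) (hKD : K < (pvDc S.toList : Int)) :
    pvIsMin S.toList K (solution_alt S K) := by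
  have hsuf0 := pvSolutionB_suf S 0 (Nat.zero_le _)
  rw [Nat.cast_zero, List.drop_zero] at hsuf0
  have htot : PySem.Set.len (pvSfx S.toList) = (pvDc S.toList : Int) :=
    pvSetLen_eq_dc (pvSfx_nodup _) (pvSfx_mem _)
  simp only [solution_alt]
  rw [hsuf0, htot, if_neg (by omega), if_neg (by omega)]
  have hfold := pvAltFold S.toList K _ (pvSolutionB_suf S) hK0 hKD 0 (Nat.zero_le _)
    ((S.toList.length : Int)) PySem.Set.empty
    (by intro x; simp [PySem.Set.empty])
    List.nodup_nil
    (by intro i j hg hi0; exfalso; have := hg.1; simp at hi0; omega)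
    (le_refl _)
    (Or.inl rfl)
  rw [Nat.cast_zero] at hfold
  obtain ⟨hle, hn, hor⟩ := hfold
  rcases hor with heq | ⟨i, j, hg, heq⟩
  · obtain ⟨i, j, hg⟩ := pvGoodExists S.toList K hK0 hKD
    have h1 := hle i j hg
    have h2 : j - i + 1 ≤ (S.toList.length : Int) := by
      obtain ⟨hgi, hgij, hgjn, _⟩ := hg
      omega
    exact ⟨⟨i, j, hg, by omega⟩, fun i' j' hg' => by
      have := hle i' j' hg'; omega⟩
  · exact ⟨⟨i, j, hg, heq⟩, hle⟩

lemma pvSolutionB_trivial (S : String) (K : Int)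
    (h : ¬ (0 ≤ K ∧ K < (pvDc S.toList : Int))) :
    solution_alt S K = if (pvDc S.toList : Int) = K then 0 else -1 := by
  have hsuf0 := pvSolutionB_suf S 0 (Nat.zero_le _)
  rw [Nat.cast_zero, List.drop_zero] at hsuf0
  have htot : PySem.Set.len (pvSfx S.toList) = (pvDc S.toList : Int) :=
    pvSetLen_eq_dc (pvSfx_nodup _) (pvSfx_mem _)
  simp only [solution_alt]
  rw [hsuf0, htot]
  by_cases h1 : K < 0
  · rw [if_pos (Or.inl h1), if_neg (by omega)]
  · by_cases h2 : (pvDc S.toList : Int) < K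
    · rw [if_pos (Or.inr h2), if_neg (by omega)]
    · have hKD : K = (pvDc S.toList : Int) := by omega
      rw [if_neg (by omega), if_pos hKD, if_pos hKD.symm]

-- ===== VERDICT (by name: the statement is the Claim_ definition above) =====
theorem solution_spec : Claim_equal_solution := by
  intro S K _ hpre
  have hlc : ∀ c ∈ S.toList, 'a' ≤ c ∧ c ≤ 'z' := by
    intro c hc
    have h := List.all_eq_true.mp hpre c hc
    simp only [Bool.and_eq_true, decide_eq_true_eq] at h
    exact ⟨by rw [Char.le_def]; exact h.1, by rw [Char.le_def]; exact h.2⟩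
  show solution S K = solution_alt S K
  by_cases h : 0 ≤ K ∧ K < (pvDc S.toList : Int)
  · exact pvIsMin_unique (pvSolutionA_isMin S K hlc h.1 h.2) (pvSolutionB_isMin S K h.1 h.2)
  · rw [pvSolutionA_trivial S K hlc h, pvSolutionB_trivial S K h]
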